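-- pv_equiv track=rewrite | github.com/DaniilLutfulin/PIAA-2025 | lb4_kmp/kmp.py | find_shift
-- ===== SOURCE A (Python) =====
-- def prefix_func(str):
--     prefixes = [0] * len(str)
--
--     for i in range(1, len(str)):
--         k = prefixes[i - 1]
--
--         while k > 0 and str[i] != str[k]:
--             k = prefixes[k - 1]
--
--         if str[i] == str[k]:
--             k += 1
--
--         prefixes[i] = k
--     return prefixes
--
-- def find_shift(pattern, text):
--     if len(pattern) != len(text):
--         return -1
--     k = 0
--     n = len(text)
--     prefixes = prefix_func(pattern)
--
--     for i in range(n * 2 - 1):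
--         cur_char = text[i % n]
--
--         while k > 0 and cur_char != pattern[k]:
--             k = prefixes[k - 1]
--
--         if pattern[k] == cur_char:
--             k += 1
--
--         if k == n:
--             return i - n + 1
--
--     return -1
-- ===== SOURCE B (Python) =====
-- def find_shift(pattern, text):
--     if len(pattern) != len(text):
--         return -1
--     return (text + text).find(pattern)
-- ===== Notes on version B (the rewrite author's own statement) =====
-- stated objective: simpler
-- what changed: Replaces the hand-written prefix-function KMP scan over the doubled text with the doubled-text characterisation of a cyclic rotation: (text+text).find(pattern) after the length guard.
-- intended difference: On the single input pattern='' and text='', A returns -1 because its loop runs 2*0-1 = -1 times, while B returns 0, the intended shift since the empty string is a rotation of itself with shift 0. — e.g. on find_shift("", ""): A returns -1, B returns 0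
import Mathlib
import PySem

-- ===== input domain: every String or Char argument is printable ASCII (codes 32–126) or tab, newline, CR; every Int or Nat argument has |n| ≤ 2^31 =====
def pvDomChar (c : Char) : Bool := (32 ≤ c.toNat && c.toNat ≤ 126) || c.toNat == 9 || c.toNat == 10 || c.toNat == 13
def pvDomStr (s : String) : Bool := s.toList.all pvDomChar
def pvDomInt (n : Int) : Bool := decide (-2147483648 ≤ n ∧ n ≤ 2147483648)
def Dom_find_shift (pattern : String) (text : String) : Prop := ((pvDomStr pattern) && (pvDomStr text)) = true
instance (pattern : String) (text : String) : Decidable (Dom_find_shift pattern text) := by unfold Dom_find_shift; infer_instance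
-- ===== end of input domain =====

-- B replaces A's hand-written prefix-function (KMP) scan over the doubled text by the
-- rotation characterisation 'shift = (text+text).find(pattern)' (objective: simpler).

-- ===== PORT A =====
-- while k > 0 and c != s[k]: k = prefixes[k-1]   (fuel-based; fuel = entry value of k
-- suffices because each stored prefix value is < its index, so k strictly decreases)
def pWhile (pref : List Nat) (s : List Char) (c : Char) : Nat → Nat → Nat
  | 0, k => k
  | fuel+1, k => if 0 < k ∧ c ≠ s.getD k ' ' then pWhile pref s c fuel (pref.getD (k-1) 0) else k
def prefix_func (s : List Char) : List Nat :=
  (List.range' 1 (s.length - 1)).foldl (fun pref i =>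
    let k0 := pref.getD (i-1) 0
    let k1 := pWhile pref s (s.getD i ' ') k0 k0
    let k2 := if s.getD i ' ' = s.getD k1 ' ' then k1 + 1 else k1
    pref.set i k2) (List.replicate s.length 0)

-- the main 'for i in range(n*2 - 1)' loop of find_shift, with early return on k == n
def kmpLoop (P T : List Char) (pref : List Nat) (n : Nat) : Nat → Nat → Nat → Int
  | 0, _, _ => -1
  | r+1, i, k =>
    let c := T.getD (i % n) ' '
    let k1 := pWhile pref P c k k
    let k2 := if P.getD k1 ' ' = c then k1 + 1 else k1
    if k2 = n then (i : Int) - (n : Int) + 1 else kmpLoop P T pref n r (i+1) k2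

def find_shift (pattern : String) (text : String) : Int :=
  if pattern.toList.length ≠ text.toList.length then -1
  else
    kmpLoop pattern.toList text.toList (prefix_func pattern.toList) text.toList.length
      (2 * text.toList.length - 1) 0 0

-- ===== PORT B =====
def find_shift_alt (pattern : String) (text : String) : Int :=
  if pattern.toList.length ≠ text.toList.length then -1
  else PySem.Chars.find (text.toList ++ text.toList) pattern.toList

-- ===== PRECONDITION & SPEC =====
-- On pattern = '' and text = '' A returns -1 (its scan runs 2*0-1 = -1 times, so the loop
-- never starts), while B returns 0, the intended shift: the empty string is a rotation of
-- itself with shift 0.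
def D_find_shift (pattern : String) (text : String) : Prop := pattern = "" ∧ text = ""
instance (pattern : String) (text : String) : Decidable (D_find_shift pattern text) := by unfold D_find_shift; infer_instance
def Spec_find_shift (pattern : String) (text : String) (out : Int) : Prop := ¬ D_find_shift pattern text → out = find_shift_alt pattern text
instance (pattern : String) (text : String) (out : Int) : Decidable (Spec_find_shift pattern text out) := by unfold Spec_find_shift; infer_instance
def pvDiffWitness_find_shift : String × String := ("", "")
def pvDiffWitnessOut_find_shift : Int × Int := (-1, 0)

-- ===== CLAIM =====
def Claim_unchanged_find_shift : Prop := ∀ (pattern : String) (text : String), Dom_find_shift pattern text → Spec_find_shift pattern text (find_shift pattern text)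
def Claim_changed_find_shift : Prop := Dom_find_shift (pvDiffWitness_find_shift.1) (pvDiffWitness_find_shift.2) ∧ D_find_shift (pvDiffWitness_find_shift.1) (pvDiffWitness_find_shift.2) ∧ find_shift (pvDiffWitness_find_shift.1) (pvDiffWitness_find_shift.2) = pvDiffWitnessOut_find_shift.1 ∧ find_shift_alt (pvDiffWitness_find_shift.1) (pvDiffWitness_find_shift.2) = pvDiffWitnessOut_find_shift.2 ∧ pvDiffWitnessOut_find_shift.1 ≠ pvDiffWitnessOut_find_shift.2
def Claim_exact_find_shift : Prop := ∀ (pattern : String) (text : String), Dom_find_shift pattern text → D_find_shift pattern text → find_shift pattern text ≠ find_shift_alt pattern text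

-- ===== LEMMAS AND PROOFS =====

def fP (P : List Char) (m : Nat) : Nat := Nat.findGreatest (fun k => P.take k <:+ P.take m) (m - 1)
lemma fP_le (P : List Char) (m : Nat) : fP P m ≤ m - 1 := Nat.findGreatest_le _
lemma fP_border (P : List Char) (m : Nat) : P.take (fP P m) <:+ P.take m :=
  Nat.findGreatest_spec (P := fun k => P.take k <:+ P.take m) (Nat.zero_le _) (by simp)
lemma fP_max {P : List Char} {m j : Nat} (h : j ≤ m - 1) (hb : P.take j <:+ P.take m) : j ≤ fP P m :=
  Nat.le_findGreatest h hb
lemma suffix_of_suffix_le {a b u : List Char} (ha : a <:+ u) (hb : b <:+ u) (h : a.length ≤ b.length) : a <:+ b := by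
  rw [← List.reverse_prefix] at *
  exact List.prefix_of_prefix_length_le ha hb (by simpa using h)

-- prefixes = [0]*len(s); for i in range(1, len(s)): ... ; exact step-for-step port of prefix_func

lemma pWhile_zero (pref : List Nat) (s : List Char) (c : Char) (f : Nat) : pWhile pref s c f 0 = 0 := by
  cases f <;> simp [pWhile]

lemma pWhile_spec {P : List Char} {pref : List Nat} {i0 : Nat}
    (Hpref : ∀ j, j < i0 → pref.getD j 0 = fP P (j+1)) (c : Char) :
    ∀ k, k < P.length → k ≤ i0 → ∀ f, k ≤ f →
      pWhile pref P c f k ≤ k ∧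
      P.take (pWhile pref P c f k) <:+ P.take k ∧
      (pWhile pref P c f k = 0 ∨ P.getD (pWhile pref P c f k) ' ' = c) ∧
      (∀ j, j ≤ k → P.take j <:+ P.take k → P.getD j ' ' = c → j ≤ pWhile pref P c f k) := by
  intro k
  induction k using Nat.strong_induction_on with
  | _ k IH =>
    intro hkP hki0 f hkf
    rcases Nat.eq_zero_or_pos k with hk0 | hk0
    · subst hk0
      rw [pWhile_zero]
      refine ⟨le_refl _, by simp, Or.inl rfl, ?_⟩
      intro j hj _ _; omega
    · obtain ⟨f', rfl⟩ : ∃ f', f = f' + 1 := ⟨f - 1, by omega⟩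
      by_cases hc : P.getD k ' ' = c
      · have : pWhile pref P c (f'+1) k = k := by
          simp only [pWhile]
          simp [hc.symm]
        rw [this]
        exact ⟨le_refl _, List.suffix_refl _, Or.inr hc, fun j hj _ _ => hj⟩
      · have hstep : pWhile pref P c (f'+1) k = pWhile pref P c f' (pref.getD (k-1) 0) := by
          simp only [pWhile]
          rw [if_pos ⟨hk0, fun h => hc h.symm⟩]
        have hpr : pref.getD (k-1) 0 = fP P k := by
          have := Hpref (k-1) (by omega)
          rwa [Nat.sub_add_cancel hk0] at this
        rw [hstep, hpr]
        set k' := fP P k with hk'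
        have hk'lt : k' < k := by have := fP_le P k; omega
        have hIH := IH k' hk'lt (by omega) (by omega) f' (by omega)
        obtain ⟨h1, h2, h3, h4⟩ := hIH
        have hbord : P.take k' <:+ P.take k := fP_border P k
        refine ⟨by omega, h2.trans hbord, h3, ?_⟩
        intro j hj hjb hjc
        have hjk : j ≠ k := by
          intro h; subst h; exact hc hjc
        have hjk' : j ≤ k' := fP_max (by omega) hjb
        have hjb' : P.take j <:+ P.take k' := by
          apply suffix_of_suffix_le hjb hbord
          simp only [List.length_take]
          omega
        exact h4 j hjk' hjb' hjc

def fB (P u : List Char) : Nat := Nat.findGreatest (fun k => P.take k <:+ u) (min P.length u.length)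
lemma fB_le (P u : List Char) : fB P u ≤ min P.length u.length := Nat.findGreatest_le _
lemma fB_border (P u : List Char) : P.take (fB P u) <:+ u :=
  Nat.findGreatest_spec (P := fun k => P.take k <:+ u) (Nat.zero_le _) (by simp)
lemma fB_max {P u : List Char} {j : Nat} (h1 : j ≤ P.length) (h2 : j ≤ u.length) (hb : P.take j <:+ u) : j ≤ fB P u :=
  Nat.le_findGreatest (le_min h1 h2) hb

lemma border_succ {P : List Char} (u : List Char) (c : Char) (k : Nat) (hk : k < P.length) :
    P.take (k+1) <:+ u ++ [c] ↔ (P.take k <:+ u ∧ P.getD k ' ' = c) := by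
  have h1 : P.take (k+1) = P.take k ++ [P[k]] := by
    rw [List.take_add_one, List.getElem?_eq_getElem hk]; rfl
  rw [h1, ← List.reverse_prefix]
  simp only [List.reverse_append, List.reverse_singleton, List.singleton_append,
    List.cons_prefix_cons, List.reverse_prefix]
  rw [List.getD_eq_getElem _ _ hk]
  tauto

lemma step_fB {P : List Char} {pref : List Nat}
    (Hpref : ∀ j, j < P.length → pref.getD j 0 = fP P (j+1))
    (u : List Char) (c : Char) (hmatch : ¬ P <:+ u) :
    (if P.getD (pWhile pref P c (fB P u) (fB P u)) ' ' = c
     then pWhile pref P c (fB P u) (fB P u) + 1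
     else pWhile pref P c (fB P u) (fB P u)) = fB P (u ++ [c]) := by
  set k := fB P u with hkdef
  have hkle : k ≤ min P.length u.length := fB_le P u
  have hkb : P.take k <:+ u := fB_border P u
  have hkn : k < P.length := by
    rcases Nat.lt_or_ge k P.length with h | h
    · exact h
    · exfalso
      have hk : k = P.length := by omega
      rw [hk, List.take_length] at hkb
      exact hmatch hkb
  obtain ⟨h1, h2, h3, h4⟩ := pWhile_spec (i0 := P.length) Hpref c k hkn (le_of_lt hkn) k (le_refl _)
  set r := pWhile pref P c k k with hrdef
  have hub : P.take r <:+ u := h2.trans hkb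
  have upper : ∀ g, P.take g <:+ u ++ [c] → g ≤ P.length → 1 ≤ g →
      (P.take (g-1) <:+ u ∧ P.getD (g-1) ' ' = c ∧ g - 1 ≤ r) := by
    intro g hg hgle hg1
    have hglt : g - 1 < P.length := by omega
    have := (border_succ u c (g-1) hglt).mp (by rw [Nat.sub_add_cancel hg1]; exact hg)
    obtain ⟨hb, hc⟩ := this
    have hjlen : g - 1 ≤ u.length := by
      have := hb.length_le
      simp only [List.length_take] at this
      omega
    have hjk : g - 1 ≤ k := le_of_le_of_eq (fB_max (by omega) hjlen hb) hkdef.symm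
    have hjb' : P.take (g-1) <:+ P.take k := by
      apply suffix_of_suffix_le hb hkb
      simp only [List.length_take]; omega
    exact ⟨hb, hc, h4 (g-1) hjk hjb' hc⟩
  by_cases hc : P.getD r ' ' = c
  · rw [if_pos hc]
    apply le_antisymm
    · refine le_trans (fB_max (P := P) (u := u ++ [c]) (by omega) (by simp; omega) ?_) (le_refl _)
      rw [border_succ u c r (by omega)]
      exact ⟨hub, hc⟩
    · set g := fB P (u ++ [c]) with hgdef
      have hgb : P.take g <:+ u ++ [c] := fB_border P (u ++ [c])
      have hgle2 : g ≤ min P.length (u ++ [c]).length := fB_le P (u ++ [c])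
      rcases Nat.eq_zero_or_pos g with h0 | h0
      · omega
      · have := upper g hgb (by omega) h0
        omega
  · rw [if_neg hc]
    have hr0 : r = 0 := h3.resolve_right hc
    rw [hr0]
    by_contra hne
    set g := fB P (u ++ [c]) with hgdef
    have hgb : P.take g <:+ u ++ [c] := fB_border P (u ++ [c])
    have hgle2 : g ≤ min P.length (u ++ [c]).length := fB_le P (u ++ [c])
    have h0 : 1 ≤ g := by omega
    obtain ⟨_, hcg, hler⟩ := upper _ hgb (by omega) h0
    have he : g - 1 = 0 := by omega
    rw [he] at hcg
    rw [hr0] at hc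
    exact hc hcg

lemma step_fP {P : List Char} {pref : List Nat} (i : Nat) (hi1 : 1 ≤ i) (hin : i < P.length)
    (Hpref : ∀ j, j < i → pref.getD j 0 = fP P (j+1)) :
    (if P.getD i ' ' = P.getD (pWhile pref P (P.getD i ' ') (fP P i) (fP P i)) ' '
     then pWhile pref P (P.getD i ' ') (fP P i) (fP P i) + 1
     else pWhile pref P (P.getD i ' ') (fP P i) (fP P i)) = fP P (i+1) := by
  set c := P.getD i ' ' with hcdef
  set k := fP P i with hkdef
  have hkle : k ≤ i - 1 := fP_le P i
  have hkn : k < P.length := by omega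
  obtain ⟨h1, h2, h3, h4⟩ := pWhile_spec (i0 := i) Hpref c k hkn (by omega) k (le_refl _)
  set r := pWhile pref P c k k with hrdef
  have htake : P.take (i+1) = P.take i ++ [P[i]] := by
    rw [List.take_add_one, List.getElem?_eq_getElem hin]; rfl
  have hPi : P.getD i ' ' = P[i] := List.getD_eq_getElem _ _ hin
  have hub : P.take r <:+ P.take i := h2.trans (fP_border P i)
  have upper : ∀ g, P.take g <:+ P.take (i+1) → g ≤ i → 1 ≤ g →
      (P.getD (g-1) ' ' = c ∧ g - 1 ≤ r) := by
    intro g hg hgle hg1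
    have hglt : g - 1 < P.length := by omega
    rw [htake, ← hPi] at hg
    have := (border_succ (P.take i) c (g-1) hglt).mp (by rw [Nat.sub_add_cancel hg1]; exact hg)
    obtain ⟨hb, hcg⟩ := this
    have hjk : g - 1 ≤ k := le_of_le_of_eq (fP_max (by omega) hb) hkdef.symm
    have hjb' : P.take (g-1) <:+ P.take k := by
      apply suffix_of_suffix_le hb (fP_border P i)
      simp only [List.length_take]; omega
    exact ⟨hcg, h4 (g-1) hjk hjb' hcg⟩
  by_cases hc : P.getD r ' ' = c
  · rw [if_pos hc.symm]
    apply le_antisymm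
    · refine le_trans (fP_max (P := P) (m := i + 1) (by omega) ?_) (le_refl _)
      rw [htake, ← hPi, border_succ (P.take i) c r (by omega)]
      exact ⟨hub, hc⟩
    · set g := fP P (i+1) with hgdef
      have hgb : P.take g <:+ P.take (i+1) := fP_border P (i+1)
      have hgle2 : g ≤ i + 1 - 1 := fP_le P (i+1)
      rcases Nat.eq_zero_or_pos g with h0 | h0
      · omega
      · have := upper g hgb (by omega) h0
        omega
  · rw [if_neg (fun h => hc h.symm)]
    have hr0 : r = 0 := h3.resolve_right hc
    rw [hr0]
    by_contra hne
    set g := fP P (i+1) with hgdef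
    have hgb : P.take g <:+ P.take (i+1) := fP_border P (i+1)
    have hgle2 : g ≤ i + 1 - 1 := fP_le P (i+1)
    have h0 : 1 ≤ g := by omega
    obtain ⟨hcg, hler⟩ := upper _ hgb (by omega) h0
    have he : g - 1 = 0 := by omega
    rw [he] at hcg
    rw [hr0] at hc
    exact hc hcg


lemma fP_one (P : List Char) : fP P 1 = 0 := by simp [fP]

lemma prefix_func_aux {P : List Char} : ∀ m, m ≤ P.length - 1 →
    ((List.range' 1 m).foldl (fun pref i =>
      let k0 := pref.getD (i-1) 0
      let k1 := pWhile pref P (P.getD i ' ') k0 k0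
      let k2 := if P.getD i ' ' = P.getD k1 ' ' then k1 + 1 else k1
      pref.set i k2) (List.replicate P.length 0)).length = P.length ∧
    (∀ j, j ≤ m → ((List.range' 1 m).foldl (fun pref i =>
      let k0 := pref.getD (i-1) 0
      let k1 := pWhile pref P (P.getD i ' ') k0 k0
      let k2 := if P.getD i ' ' = P.getD k1 ' ' then k1 + 1 else k1
      pref.set i k2) (List.replicate P.length 0)).getD j 0 = fP P (j+1)) ∧
    (∀ j, m < j → ((List.range' 1 m).foldl (fun pref i =>
      let k0 := pref.getD (i-1) 0
      let k1 := pWhile pref P (P.getD i ' ') k0 k0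
      let k2 := if P.getD i ' ' = P.getD k1 ' ' then k1 + 1 else k1
      pref.set i k2) (List.replicate P.length 0)).getD j 0 = 0) := by
  intro m
  induction m with
  | zero =>
    intro _
    refine ⟨by simp, ?_, ?_⟩
    · intro j hj
      interval_cases j
      simp [fP_one, List.getD_eq_getElem?_getD]
    · intro j hj
      simp [List.getD_eq_getElem?_getD]
  | succ m IH =>
    intro hm
    obtain ⟨IHlen, IHlo, IHhi⟩ := IH (by omega)
    have hrange : List.range' 1 (m+1) = List.range' 1 m ++ [1 + m] := by
      simpa using List.range'_concat (s := 1) (n := m) (step := 1)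
    rw [hrange, List.foldl_append]
    set pref := (List.range' 1 m).foldl _ (List.replicate P.length 0) with hpref
    simp only [List.foldl_cons, List.foldl_nil]
    set i := 1 + m with hidef
    have hi1 : 1 ≤ i := by omega
    have hin : i < P.length := by omega
    have hk0 : pref.getD (i-1) 0 = fP P i := by
      have := IHlo (i-1) (by omega)
      rw [this]
      congr 1
      omega
    have Hpref' : ∀ j, j < i → pref.getD j 0 = fP P (j+1) := by
      intro j hj
      exact IHlo j (by omega)
    rw [hk0]
    have hstep := step_fP (P := P) (pref := pref) i hi1 hin Hpref'
    refine ⟨by simp [IHlen], ?_, ?_⟩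
    · intro j hj
      rcases Nat.lt_or_ge j i with hji | hji
      · rw [List.getD_eq_getElem?_getD, List.getElem?_set_ne (by omega), ← List.getD_eq_getElem?_getD]
        exact IHlo j (by omega)
      · have hje : j = i := by omega
        subst hje
        rw [List.getD_eq_getElem?_getD, List.getElem?_set_self (by omega), Option.getD_some]
        exact hstep
    · intro j hj
      rw [List.getD_eq_getElem?_getD, List.getElem?_set_ne (by omega), ← List.getD_eq_getElem?_getD]
      exact IHhi j (by omega)

lemma prefix_func_spec {P : List Char} : ∀ j, j < P.length → (prefix_func P).getD j 0 = fP P (j+1) := by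
  intro j hj
  obtain ⟨_, hlo, hhi⟩ := prefix_func_aux (P := P) (P.length - 1) (le_refl _)
  exact hlo j (by omega)


lemma streamChar {T : List Char} {i : Nat} (hi : i < 2 * T.length) :
    (T ++ T).getD i ' ' = T.getD (i % T.length) ' ' := by
  rcases Nat.lt_or_ge i T.length with h | h
  · rw [List.getD_append _ _ _ _ h, Nat.mod_eq_of_lt h]
  · rw [List.getD_append_right _ _ _ _ h]
    congr 1
    rw [Nat.mod_eq_sub_mod h, Nat.mod_eq_of_lt (by omega)]

lemma take_concat_getD {T : List Char} {i : Nat} (hi : i < (T ++ T).length) :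
    (T ++ T).take (i+1) = (T ++ T).take i ++ [(T ++ T).getD i ' '] := by
  rw [List.take_add_one, List.getElem?_eq_getElem hi, List.getD_eq_getElem _ _ hi]
  rfl

lemma kmpLoop_spec {P T : List Char} (hPT : P.length = T.length)
    {pref : List Nat} (Hpref : ∀ j, j < P.length → pref.getD j 0 = fP P (j+1)) :
    ∀ r i k, i + r = 2 * T.length - 1 →
      k = fB P ((T++T).take i) →
      (∀ j, j ≤ i → ¬ P <:+ (T++T).take j) →
      kmpLoop P T pref T.length r i k =
        (match (List.range' (i+1) r).find? (fun j => decide (P <:+ (T++T).take j)) with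
         | some j => (j : Int) - (T.length : Int) | none => -1) := by
  intro r
  induction r with
  | zero => intro i k _ _ _; simp [kmpLoop]
  | succ r IH =>
    intro i k hir hk hNM
    have hi2n : i < 2 * T.length := by omega
    have hc : T.getD (i % T.length) ' ' = (T ++ T).getD i ' ' := (streamChar hi2n).symm
    have htk : (T ++ T).take (i+1) = (T ++ T).take i ++ [(T ++ T).getD i ' '] :=
      take_concat_getD (by simp; omega)
    have hstep := step_fB (P := P) (pref := pref) Hpref ((T++T).take i) ((T ++ T).getD i ' ')
      (hNM i (le_refl _))
    rw [← htk] at hstep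
    simp only [kmpLoop]
    rw [← hc, ← hk] at hstep
    rw [List.range'_succ]
    by_cases hk2 : (if P.getD (pWhile pref P (T.getD (i % T.length) ' ') k k) ' ' = T.getD (i % T.length) ' '
        then pWhile pref P (T.getD (i % T.length) ' ') k k + 1
        else pWhile pref P (T.getD (i % T.length) ' ') k k) = T.length
    · rw [if_pos hk2]
      have hmatch : P <:+ (T++T).take (i+1) := by
        have : fB P ((T++T).take (i+1)) = P.length := by rw [← hstep, hk2, hPT]
        have hb := fB_border P ((T++T).take (i+1))
        rwa [this, List.take_length] at hb
      rw [List.find?_cons_of_pos (p := fun j => decide (P <:+ List.take j (T ++ T))) (by simpa using hmatch)]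
      push_cast
      ring
    · rw [if_neg hk2]
      have hnomatch : ¬ P <:+ (T++T).take (i+1) := by
        intro hsuf
        apply hk2
        rw [hstep, ← hPT]
        have hlen : P.length ≤ i + 1 := by
          have := hsuf.length_le
          simp at this
          omega
        apply le_antisymm
        · have := fB_le P ((T++T).take (i+1)); omega
        · apply fB_max (le_refl _) (by simp; omega)
          rw [List.take_length]
          exact hsuf
      rw [List.find?_cons_of_neg (p := fun j => decide (P <:+ List.take j (T ++ T))) (by simpa using hnomatch)]
      exact IH (i+1) _ (by omega) hstep
        (fun j hj => by rcases Nat.lt_or_ge j (i+1) with h | h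
                        · exact hNM j (by omega)
                        · have : j = i + 1 := by omega
                          subst this; exact hnomatch)

lemma find?_range'_eq_some {p : Nat → Bool} {j0 : Nat} : ∀ (len a : Nat), a ≤ j0 → j0 < a + len →
    p j0 = true → (∀ j, a ≤ j → j < j0 → p j = false) →
    (List.range' a len).find? p = some j0 := by
  intro len
  induction len with
  | zero => intro a h1 h2; omega
  | succ len IH =>
    intro a h1 h2 hp hmin
    rw [List.range'_succ]
    rcases Nat.eq_or_lt_of_le h1 with rfl | hlt
    · rw [List.find?_cons_of_pos (p := p) hp]
    · rw [List.find?_cons_of_neg (p := p) (by simp [hmin a (le_refl _) hlt])]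
      exact IH (a+1) hlt (by omega) hp (fun j hj1 hj2 => hmin j (by omega) hj2)

lemma bridge {P T : List Char} (hPT : P.length = T.length) {s : Nat} (hs : s ≤ T.length) :
    (P <:+ (T++T).take (T.length + s)) ↔ P <+: (T++T).drop s := by
  have hlen : ((T++T).take (T.length + s)).length = T.length + s := by simp; omega
  have hdt : ((T++T).take (T.length + s)).drop s = ((T++T).drop s).take T.length := by
    rw [List.drop_take]
    congr 1
    omega
  constructor
  · intro h
    rw [List.suffix_iff_eq_drop] at h
    rw [List.prefix_iff_eq_take]
    rw [hPT] at h ⊢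
    rw [h, hlen]
    have : T.length + s - T.length = s := by omega
    rw [this, hdt]
  · intro h
    rw [List.prefix_iff_eq_take] at h
    rw [List.suffix_iff_eq_drop]
    rw [hPT] at h ⊢
    rw [hlen]
    have : T.length + s - T.length = s := by omega
    rw [this, hdt]
    exact h

lemma main_eq {P T : List Char} (hPT : P.length = T.length) (hn : 0 < T.length) :
    kmpLoop P T (prefix_func P) T.length (2*T.length - 1) 0 0 = PySem.Chars.find (T ++ T) P := by
  have hzero : (0 : Nat) = fB P ((T++T).take 0) := by
    simp [fB]
  have hNM0 : ∀ j, j ≤ 0 → ¬ P <:+ (T++T).take j := by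
    intro j hj
    interval_cases j
    simp only [List.take_zero, List.suffix_nil]
    intro h
    rw [h] at hPT
    simp at hPT
    omega
  rw [kmpLoop_spec hPT prefix_func_spec (2*T.length - 1) 0 0 (by omega) hzero hNM0]
  by_cases hinf : P <:+: (T ++ T)
  · have hFnn : 0 ≤ PySem.Chars.find (T ++ T) P := (PySem.Chars.find_nonneg_iff (T++T) P).mpr hinf
    obtain ⟨hocc, hmin⟩ := PySem.Chars.find_spec hFnn
    set s0 := (PySem.Chars.find (T ++ T) P).toNat with hs0
    have hFle : PySem.Chars.find (T ++ T) P ≤ ((T++T).length : Int) := PySem.Chars.find_le_length _ _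
    have hs02n : s0 ≤ 2 * T.length := by
      simp only [List.length_append] at hFle
      rw [hs0]
      omega
    have hs0n : s0 ≤ T.length := by
      have := hocc.length_le
      simp only [List.length_drop, List.length_append] at this
      rw [hPT] at this
      omega
    have hs0ne : s0 ≠ T.length := by
      intro he
      rw [he] at hocc
      rw [List.drop_left] at hocc
      have hPTeq : P = T := hocc.eq_of_length (by omega)
      have h0 : ¬ P <+: (T ++ T).drop 0 := hmin 0 (by omega)
      rw [List.drop_zero] at h0
      exact h0 (hPTeq ▸ List.prefix_append P T)
    have hs0lt : s0 < T.length := by omega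
    rw [find?_range'_eq_some (j0 := T.length + s0) (2 * T.length - 1) 1 (by omega) (by omega)
      (by simp only [decide_eq_true_eq]
          exact (bridge hPT (by omega)).mpr hocc)
      (by intro j hj1 hj2
          simp only [decide_eq_false_iff_not]
          rcases Nat.lt_or_ge j T.length with hjn | hjn
          · intro hsuf
            have := hsuf.length_le
            simp only [List.length_take, List.length_append] at this
            omega
          · intro hsuf
            have hj' : j = T.length + (j - T.length) := by omega
            rw [hj'] at hsuf
            have := (bridge hPT (s := j - T.length) (by omega)).mp hsuf
            exact hmin (j - T.length) (by omega) this)]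
    simp only []
    rw [show ((T.length + s0 : Nat) : Int) - (T.length : Int) = (s0 : Int) by push_cast; ring]
    rw [hs0, Int.toNat_of_nonneg hFnn]
  · rw [(PySem.Chars.find_eq_neg_one_iff (T++T) P).mpr hinf]
    have hnone : (List.range' (0+1) (2 * T.length - 1)).find?
        (fun j => decide (P <:+ List.take j (T ++ T))) = none := by
      rw [List.find?_eq_none]
      intro j hj
      simp only [decide_eq_true_eq]
      intro hsuf
      exact hinf (hsuf.isInfix.trans (List.take_prefix j (T++T)).isInfix)
    rw [hnone]

-- ===== VERDICT =====
theorem find_shift_spec : Claim_unchanged_find_shift := by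
  intro pattern text _ hD'
  unfold find_shift find_shift_alt
  by_cases hlen : pattern.toList.length = text.toList.length
  · rw [if_neg (by omega), if_neg (by omega)]
    have hn : 0 < text.toList.length := by
      by_contra h
      apply hD'
      have ht : text.toList = [] := by
        cases htl : text.toList with
        | nil => rfl
        | cons a l => rw [htl] at h; simp at h
      have hp : pattern.toList = [] := by
        have := hlen
        rw [ht] at this
        simpa using List.eq_nil_of_length_eq_zero this
      exact ⟨String.toList_eq_nil_iff.mp hp, String.toList_eq_nil_iff.mp ht⟩
    exact main_eq hlen hn
  · rw [if_pos (by omega), if_pos (by omega)]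

theorem find_shift_changed : Claim_changed_find_shift := by unfold Claim_changed_find_shift; decide

theorem find_shift_tight : Claim_exact_find_shift := by
  intro pattern text _ hD
  obtain ⟨h1, h2⟩ := hD
  subst h1; subst h2
  decide
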